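-- pv_equiv track=rewrite | github.com/genc1345ifuranot/crontab-linter | crontab_linter/heatmap.py | _expand_field
-- ===== SOURCE A (Python) =====
-- from typing import Dict, List, Optional
--
-- def _expand_field(raw: str, lo: int, hi: int) -> List[int]:
--     """Return the list of integers matched by a single cron field token."""
--     values: List[int] = []
--     for part in raw.split(","):
--         if part == "*":
--             values.extend(range(lo, hi + 1))
--         elif "/" in part:
--             base, step = part.split("/", 1)
--             start = lo if base == "*" else int(base)
--             values.extend(range(start, hi + 1, int(step)))
--         elif "-" in part:
--             a, b = part.split("-", 1)
--             values.extend(range(int(a), int(b) + 1))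
--         else:
--             values.append(int(part))
--     return sorted(set(v for v in values if lo <= v <= hi))
-- ===== SOURCE B (Python) =====
-- from typing import List
--
-- def _parse(part: str, lo: int):
--     """Turn one cron token into an arithmetic descriptor (kind, x, y)."""
--     if part == "*":
--         return ("all", 0, 0)
--     if "/" in part:
--         base, step = part.split("/", 1)
--         return ("step", lo if base == "*" else int(base), int(step))
--     if "-" in part:
--         a, b = part.split("-", 1)
--         return ("range", int(a), int(b))
--     return ("one", int(part), 0)
--
-- def _matches(v: int, tok) -> bool:
--     kind, x, y = tok
--     if kind == "all":
--         return True
--     if kind == "step":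
--         return y > 0 and x <= v and (v - x) % y == 0
--     if kind == "range":
--         return x <= v <= y
--     return v == x
--
-- def _expand_field(raw: str, lo: int, hi: int) -> List[int]:
--     """Return the list of integers matched by a single cron field token."""
--     toks = [_parse(part, lo) for part in raw.split(",")]
--     return [v for v in range(lo, hi + 1) if any(_matches(v, t) for t in toks)]
-- ===== Notes on version B (the rewrite author's own statement) =====
-- stated objective: alternative
-- what changed: B inverts the traversal: instead of generating every value of every token and then sorted(set(filter(...))), it parses each token once into an arithmetic descriptor and scans the candidates v in [lo,hi] in order, testing membership arithmetically (divisibility for step tokens, interval bounds for ranges) - no value generation, no set, no sort.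
import Mathlib
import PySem

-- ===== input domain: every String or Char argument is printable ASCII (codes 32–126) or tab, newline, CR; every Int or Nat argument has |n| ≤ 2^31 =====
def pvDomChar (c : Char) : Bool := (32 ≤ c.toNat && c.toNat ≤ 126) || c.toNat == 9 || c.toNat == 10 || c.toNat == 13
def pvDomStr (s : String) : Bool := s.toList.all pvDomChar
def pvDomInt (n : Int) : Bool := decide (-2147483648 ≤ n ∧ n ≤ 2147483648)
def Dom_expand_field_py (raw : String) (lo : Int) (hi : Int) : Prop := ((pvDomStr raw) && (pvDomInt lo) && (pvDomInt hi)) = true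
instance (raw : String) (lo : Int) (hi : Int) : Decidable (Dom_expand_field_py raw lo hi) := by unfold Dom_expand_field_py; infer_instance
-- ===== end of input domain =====

-- B inverts the traversal: each token is parsed once into an arithmetic descriptor and
-- the candidates v in [lo, hi] are scanned in order, each tested arithmetically
-- (divisibility for step tokens, interval bounds for ranges) — no value generation,
-- no set, no sort.  Objective: alternative (no speed claim).

-- ===== PORT A =====
-- A: collect every generated value into `values`, then sorted(set(...)) of the
-- in-range ones.  Inputs where Python A raises (int(...) ValueError, step 0) are
-- excluded by Pre_expand_field_py below; the `.getD` defaults are never reached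
-- under it (tuple unpacking `base, step = part.split(sep, 1)` is ported as
-- `pieces.getD 0 "" / pieces.getD 1 ""`, exact when the separator occurs in part).
def expand_field_py (raw : String) (lo : Int) (hi : Int) : List Int :=
  PySem.List.sorted
    (PySem.Set.ofList
      ((((PySem.Str.split? raw ",").getD []).foldl (fun vals part =>   -- sep "," ≠ "", so split? is `some`
        if part = "*" then
          vals ++ PySem.List.pyRange lo (hi + 1) 1
        else if PySem.Str.isIn "/" part then
          let pieces := (PySem.Str.splitMax? part "/" 1).getD []
          let base := pieces.getD 0 ""
          let step := pieces.getD 1 ""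
          let start := if base = "*" then lo else (PySem.Int.ofStr? base).getD 0
          vals ++ PySem.List.pyRange start (hi + 1) ((PySem.Int.ofStr? step).getD 1)
        else if PySem.Str.isIn "-" part then
          let pieces := (PySem.Str.splitMax? part "-" 1).getD []
          let a := pieces.getD 0 ""
          let b := pieces.getD 1 ""
          vals ++ PySem.List.pyRange ((PySem.Int.ofStr? a).getD 0) ((PySem.Int.ofStr? b).getD 0 + 1) 1
        else
          vals ++ [(PySem.Int.ofStr? part).getD 0]) []).filter
        (fun v => decide (lo ≤ v) && decide (v ≤ hi))))
    (fun v => v) false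

-- ===== PORT B =====
-- B's tagged descriptor tuple ("kind", x, y) from _parse
inductive PvTok
  | all : PvTok
  | stp : Int → Int → PvTok
  | rng : Int → Int → PvTok
  | one : Int → PvTok
deriving DecidableEq, Repr

-- Python B's _parse(part, lo)
def pvParse (lo : Int) (part : String) : PvTok :=
  if part = "*" then PvTok.all
  else if PySem.Str.isIn "/" part then
    let pieces := (PySem.Str.splitMax? part "/" 1).getD []
    let base := pieces.getD 0 ""
    let step := pieces.getD 1 ""
    PvTok.stp (if base = "*" then lo else (PySem.Int.ofStr? base).getD 0) ((PySem.Int.ofStr? step).getD 1)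
  else if PySem.Str.isIn "-" part then
    let pieces := (PySem.Str.splitMax? part "-" 1).getD []
    PvTok.rng ((PySem.Int.ofStr? (pieces.getD 0 "")).getD 0) ((PySem.Int.ofStr? (pieces.getD 1 "")).getD 0)
  else PvTok.one ((PySem.Int.ofStr? part).getD 0)

-- Python B's _matches(v, tok)
def pvMatches (v : Int) (t : PvTok) : Bool :=
  match t with
  | PvTok.all => true
  | PvTok.stp x y => decide (0 < y) && decide (x ≤ v) && (PySem.Int.mod (v - x) y == 0)
  | PvTok.rng a b => decide (a ≤ v) && decide (v ≤ b)
  | PvTok.one n => v == n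

-- B: parse each token once, then scan the candidates lo..hi in order and keep those
-- some descriptor matches.
def expand_field_py_alt (raw : String) (lo : Int) (hi : Int) : List Int :=
  let toks := ((PySem.Str.split? raw ",").getD []).map (pvParse lo)
  (PySem.List.pyRange lo (hi + 1) 1).filter (fun v => toks.any (pvMatches v))

-- ===== PRECONDITION & SPEC =====
-- Python A raises ValueError where an int(...) conversion fails (empty/garbage
-- pieces, a negative singleton like "-3", "a-b/s" tokens) or a "/" step is 0
-- (range step 0); Pre_ excludes exactly those inputs.
def pvPartOK (part : String) : Bool :=
  if part = "*" then true
  else if PySem.Str.isIn "/" part then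
    let pieces := (PySem.Str.splitMax? part "/" 1).getD []
    ((pieces.getD 0 "" == "*") || (PySem.Int.ofStr? (pieces.getD 0 "")).isSome) &&
      (PySem.Int.ofStr? (pieces.getD 1 "")).isSome && ((PySem.Int.ofStr? (pieces.getD 1 "")).getD 0 != 0)
  else if PySem.Str.isIn "-" part then
    let pieces := (PySem.Str.splitMax? part "-" 1).getD []
    (PySem.Int.ofStr? (pieces.getD 0 "")).isSome && (PySem.Int.ofStr? (pieces.getD 1 "")).isSome
  else (PySem.Int.ofStr? part).isSome

def Pre_expand_field_py (raw : String) (lo : Int) (hi : Int) : Prop :=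
  ∀ part ∈ (PySem.Str.split? raw ",").getD [], pvPartOK part = true
instance (raw : String) (lo : Int) (hi : Int) : Decidable (Pre_expand_field_py raw lo hi) := by
  unfold Pre_expand_field_py; infer_instance

def pvWitness_expand_field_py : String × Int × Int := ("*/15,3-5,7", 0, 59)

def Spec_expand_field_py (raw : String) (lo : Int) (hi : Int) (out : List Int) : Prop := out = expand_field_py_alt raw lo hi
instance (raw : String) (lo : Int) (hi : Int) (out : List Int) : Decidable (Spec_expand_field_py raw lo hi out) := by unfold Spec_expand_field_py; infer_instance

-- ===== CLAIM (what is proved, stated in full; the proofs are below) =====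
def Claim_equal_expand_field_py : Prop := ∀ (raw : String) (lo : Int) (hi : Int), Dom_expand_field_py raw lo hi → Pre_expand_field_py raw lo hi → Spec_expand_field_py raw lo hi (expand_field_py raw lo hi)
-- ===== LEMMAS AND PROOFS =====

-- the per-part generated value list of A (the body of each of A's branches)
def pvGen (lo hi : Int) (part : String) : List Int :=
  if part = "*" then
    PySem.List.pyRange lo (hi + 1) 1
  else if PySem.Str.isIn "/" part then
    let pieces := (PySem.Str.splitMax? part "/" 1).getD []
    let base := pieces.getD 0 ""
    let step := pieces.getD 1 ""
    let start := if base = "*" then lo else (PySem.Int.ofStr? base).getD 0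
    PySem.List.pyRange start (hi + 1) ((PySem.Int.ofStr? step).getD 1)
  else if PySem.Str.isIn "-" part then
    let pieces := (PySem.Str.splitMax? part "-" 1).getD []
    let a := pieces.getD 0 ""
    let b := pieces.getD 1 ""
    PySem.List.pyRange ((PySem.Int.ofStr? a).getD 0) ((PySem.Int.ofStr? b).getD 0 + 1) 1
  else [(PySem.Int.ofStr? part).getD 0]

def pvValues (raw : String) (lo hi : Int) : List Int :=
  ((PySem.Str.split? raw ",").getD []).flatMap (pvGen lo hi)

lemma pvA_eq (raw : String) (lo hi : Int) :
    expand_field_py raw lo hi =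
      PySem.List.sorted (PySem.Set.ofList ((pvValues raw lo hi).filter
        (fun v => decide (lo ≤ v) && decide (v ≤ hi)))) (fun v => v) false := by
  unfold expand_field_py pvValues
  rw [show (fun (vals : List Int) (part : String) =>
      (if part = "*" then
        vals ++ PySem.List.pyRange lo (hi + 1) 1
      else if PySem.Str.isIn "/" part then
        let pieces := (PySem.Str.splitMax? part "/" 1).getD []
        let base := pieces.getD 0 ""
        let step := pieces.getD 1 ""
        let start := if base = "*" then lo else (PySem.Int.ofStr? base).getD 0
        vals ++ PySem.List.pyRange start (hi + 1) ((PySem.Int.ofStr? step).getD 1)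
      else if PySem.Str.isIn "-" part then
        let pieces := (PySem.Str.splitMax? part "-" 1).getD []
        let a := pieces.getD 0 ""
        let b := pieces.getD 1 ""
        vals ++ PySem.List.pyRange ((PySem.Int.ofStr? a).getD 0) ((PySem.Int.ofStr? b).getD 0 + 1) 1
      else
        vals ++ [(PySem.Int.ofStr? part).getD 0])) = fun vals part => vals ++ pvGen lo hi part
    from funext fun vals => funext fun part => by unfold pvGen; split_ifs <;> rfl,
    PySem.List.foldl_append_eq_flatMap]
  simp

-- A computes the canonical result: the in-range generated values in increasing order
lemma pvA_canon (raw : String) (lo hi : Int) :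
    expand_field_py raw lo hi =
      ((List.range (hi - lo + 1).toNat).map (fun (i : Nat) => lo + (i : Int))).filter
        (fun v => decide (v ∈ pvValues raw lo hi)) := by
  rw [pvA_eq]
  apply PySem.List.sorted_eq_of_perm_of_pairwise_lt
  · rw [List.perm_ext_iff_of_nodup]
    · intro x
      rw [PySem.Set.mem_ofList, List.mem_filter, List.mem_filter, List.mem_map]
      constructor
      · rintro ⟨⟨i, hi', rfl⟩, hx⟩
        rw [List.mem_range] at hi'
        refine ⟨by simpa using hx, by simp only [Bool.and_eq_true, decide_eq_true_eq]; constructor <;> omega⟩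
      · rintro ⟨hx, hr⟩
        have hr' : lo ≤ x ∧ x ≤ hi := by
          simp only [Bool.and_eq_true, decide_eq_true_eq] at hr
          exact hr
        refine ⟨⟨(x - lo).toNat, ?_, by simp; omega⟩, by simpa using hx⟩
        rw [List.mem_range]; omega
    · exact List.Nodup.filter _ (List.nodup_range.map (by intro a b hab; simp at hab; omega))
    · exact PySem.Set.nodup_ofList _
  · exact List.Pairwise.filter _ (List.pairwise_lt_range.map _ (by intro a b hab; omega))

-- the "*" branch: within [lo, hi] every candidate is generated
lemma pvAll_iff (lo hi v : Int) (hv : lo ≤ v ∧ v ≤ hi) :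
    (v ∈ PySem.List.pyRange lo (hi + 1) 1) ↔ (true = true) := by
  rw [PySem.List.mem_pyRange_one]
  simp
  omega

-- the "/" branch: generated iff the step descriptor matches arithmetically
lemma pvStep_iff (start step v hi : Int) (hs : step ≠ 0) (hv : v ≤ hi) :
    (v ∈ PySem.List.pyRange start (hi + 1) step) ↔
      (decide (0 < step) && decide (start ≤ v) && (PySem.Int.mod (v - start) step == 0)) = true := by
  rcases lt_or_gt_of_ne hs with hneg | hpos
  · rw [PySem.List.mem_pyRange_iff_of_neg hneg]
    simp only [Bool.and_eq_true, decide_eq_true_eq, beq_iff_eq]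
    constructor
    · rintro ⟨h, -, -⟩
      exact absurd hv (by omega)
    · rintro ⟨⟨h, -⟩, -⟩
      exact absurd h (by omega)
  · rw [PySem.List.mem_pyRange_iff_of_pos hpos]
    simp only [Bool.and_eq_true, decide_eq_true_eq, beq_iff_eq, PySem.Int.mod_eq_zero_iff_dvd]
    constructor
    · rintro ⟨h1, -, h3⟩
      exact ⟨⟨hpos, h1⟩, h3⟩
    · rintro ⟨⟨-, h2⟩, h3⟩
      exact ⟨h2, by omega, h3⟩

-- the "-" branch: generated iff within the token's interval
lemma pvRng_iff (a b v : Int) :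
    (v ∈ PySem.List.pyRange a (b + 1) 1) ↔ (decide (a ≤ v) && decide (v ≤ b)) = true := by
  rw [PySem.List.mem_pyRange_one]
  simp only [Bool.and_eq_true, decide_eq_true_eq]
  omega

-- per-token agreement: for v in [lo, hi] and a token A does not raise on,
-- v is generated by A's branch iff B's descriptor matches v
lemma pvGen_iff_matches (lo hi : Int) (part : String) (v : Int)
    (hok : pvPartOK part = true) (hv : lo ≤ v ∧ v ≤ hi) :
    (v ∈ pvGen lo hi part) ↔ pvMatches v (pvParse lo part) = true := by
  unfold pvPartOK at hok
  unfold pvGen pvParse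
  split_ifs at hok ⊢ with h1 h2 h3
  · exact pvAll_iff lo hi v hv
  · simp only [Bool.and_eq_true, Bool.or_eq_true, beq_iff_eq, bne_iff_ne, ne_eq] at hok
    obtain ⟨⟨-, hsome⟩, hne⟩ := hok
    obtain ⟨k, hk⟩ := Option.isSome_iff_exists.mp hsome
    have hs0 : (PySem.Int.ofStr? (((PySem.Str.splitMax? part "/" 1).getD []).getD 1 "")).getD 1 ≠ 0 := by
      rw [hk] at hne ⊢
      simpa using hne
    exact pvStep_iff _ _ v hi hs0 hv.2
  · exact pvRng_iff _ _ v
  · simp [pvMatches]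

-- ===== VERDICT (by name: the statement is the Claim_ definition above) =====
theorem expand_field_py_spec : Claim_equal_expand_field_py := by
  intro raw lo hi _ hpre
  unfold Spec_expand_field_py expand_field_py_alt
  rw [pvA_canon]
  simp only [PySem.List.pyRange_one, List.any_map]
  rw [show (hi + 1 - lo).toNat = (hi - lo + 1).toNat from by omega]
  apply List.filter_congr
  intro v hv
  rw [List.mem_map] at hv
  rcases hv with ⟨i, hi', rfl⟩
  rw [List.mem_range] at hi'
  have hb : lo ≤ lo + (i : Int) ∧ lo + (i : Int) ≤ hi := by omega
  rw [Bool.eq_iff_iff, decide_eq_true_eq, List.any_eq_true]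
  unfold pvValues
  rw [List.mem_flatMap]
  constructor
  · rintro ⟨part, hp, hvp⟩
    exact ⟨part, hp, (pvGen_iff_matches lo hi part _ (hpre part hp) hb).mp hvp⟩
  · rintro ⟨part, hp, hm⟩
    exact ⟨part, hp, (pvGen_iff_matches lo hi part _ (hpre part hp) hb).mpr hm⟩
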